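-- pv_equiv track=rewrite | github.com/Bocabbage/G4Hunter | python3/G4Hunter.py | __BaseScore
-- ===== SOURCE A (Python) =====
-- def __BaseScore(seq):
--     '''
--         take a sequence as input and return the score of every base
--     '''
--     item, bases_score = 0, []
--     seq_len = len(seq)
--     while (item < seq_len):
--         if(seq[item] == 'G' or seq[item] == 'g'):
--             # G-base(s) scoring rules:
--             # if single G, gives score 1;
--             # if GG, gives each G a score 2;
--             # the max score for a base is 4
--             new_item = item + 1
--             new_score = 1
--             for increment in range(1, 4):
--                 if (
--                      new_item < seq_len and
--                      (seq[new_item] == 'G' or seq[new_item] == 'g')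
--                    ):
--                     new_item += 1
--                     new_score += 1
--                 else:
--                     break
--             bases_score += [ new_score for x in range(new_item - item) ]
--             item = new_item
--
--             # if more than 4 continuous G, all of them
--             # are given score 4.
--             while(item < seq_len and (seq[item] == 'G' or seq[item] == 'g')):
--                 bases_score.append(4)
--                 item += 1
--
--         elif(seq[item] == 'C' or seq[item] == 'c'):
--             # C-base(s) scoring rules:
--             # if single C, gives score -1;
--             # if CC, gives each G a score -2;
--             # the min score for a base is -4
--             new_item = item + 1
--             new_score = -1
--             for increment in range(1, 4):
--                 if (
--                      new_item < seq_len and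
--                      (seq[new_item] == 'C' or seq[new_item] == 'c')
--                    ):
--                     new_item += 1
--                     new_score -= 1
--                 else:
--                     break
--             bases_score += [ new_score for x in range(new_item - item) ]
--             item = new_item
--
--             # if more than 4 continuous C, all of them
--             # are given score -4.
--             while(item < seq_len and (seq[item] == 'C' or seq[item] == 'c')):
--                 bases_score.append(-4)
--                 item += 1
--
--         else:
--             # A, T, U and N
--             bases_score.append(0)
--             item += 1
--
--     return bases_score
-- ===== SOURCE B (Python) =====
-- from itertools import groupby
--
-- def __BaseScore(seq):
--     def cls(ch):
--         if ch == 'G' or ch == 'g':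
--             return 'G'
--         if ch == 'C' or ch == 'c':
--             return 'C'
--         return 'other'
--     out = []
--     for key, grp in groupby(seq, key=cls):
--         L = sum(1 for _ in grp)
--         if key == 'G':
--             out += [min(L, 4)] * L
--         elif key == 'C':
--             out += [-min(L, 4)] * L
--         else:
--             out += [0] * L
--     return out
-- ===== Notes on version B (the rewrite author's own statement) =====
-- stated objective: simpler
-- what changed: Replaces A's index-driven while loop with its capped for-count and separate flooding while by a group-runs decomposition: groupby the sequence into maximal same-class runs and emit min(L,4)/-min(L,4)/0 repeated L times per run.
import Mathlib
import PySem

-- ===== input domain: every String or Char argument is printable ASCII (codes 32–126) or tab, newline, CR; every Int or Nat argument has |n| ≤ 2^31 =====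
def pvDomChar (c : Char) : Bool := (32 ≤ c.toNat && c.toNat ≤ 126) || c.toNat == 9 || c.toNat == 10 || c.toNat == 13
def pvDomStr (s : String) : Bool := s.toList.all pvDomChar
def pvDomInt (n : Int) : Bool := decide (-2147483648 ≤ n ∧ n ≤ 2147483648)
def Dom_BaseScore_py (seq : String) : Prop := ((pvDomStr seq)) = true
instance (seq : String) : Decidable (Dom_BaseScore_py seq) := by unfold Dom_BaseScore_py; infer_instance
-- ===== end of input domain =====

-- B replaces A's capped for-count plus flooding while with a group-runs decomposition (simpler); same O(n) cost.

-- ===== PORT A =====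
def pvIsG (c : Char) : Bool := c == 'G' || c == 'g'
def pvIsC (c : Char) : Bool := c == 'C' || c == 'c'

-- the 'for increment in range(1,4)' loop: counts further same-class chars, at most `cap`
def pvForCount (p : Char → Bool) : List Char → Nat → Nat
  | _, 0 => 0
  | [], _ + 1 => 0
  | c :: rest, n + 1 => if p c then pvForCount p rest n + 1 else 0

-- the flooding 'while' loop: appends v for each further leading same-class char, returns the suffix
def pvFlood (p : Char → Bool) (v : Int) : List Char → List Int × List Char
  | [] => ([], [])
  | c :: rest =>
    if p c then
      let fr := pvFlood p v rest
      (v :: fr.1, fr.2)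
    else ([], c :: rest)

theorem pvFlood_snd_length_le (p : Char → Bool) (v : Int) (cs : List Char) :
    (pvFlood p v cs).2.length ≤ cs.length := by
  induction cs with
  | nil => simp [pvFlood]
  | cons c rest ih =>
    simp only [pvFlood]
    split
    · simpa using Nat.le_succ_of_le ih
    · simp

def pvLoopA : List Char → List Int
  | [] => []
  | c :: rest =>
    if pvIsG c then
      let k := pvForCount pvIsG rest 3
      let fr := pvFlood pvIsG 4 (rest.drop k)
      List.replicate (k + 1) ((k : Int) + 1) ++ fr.1 ++ pvLoopA fr.2
    else if pvIsC c then
      let k := pvForCount pvIsC rest 3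
      let fr := pvFlood pvIsC (-4) (rest.drop k)
      List.replicate (k + 1) (-((k : Int) + 1)) ++ fr.1 ++ pvLoopA fr.2
    else 0 :: pvLoopA rest
termination_by cs => cs.length
decreasing_by
  · have h1 := pvFlood_snd_length_le pvIsG 4 (rest.drop (pvForCount pvIsG rest 3))
    have h2 := List.length_drop (l := rest) (i := pvForCount pvIsG rest 3)
    simp only [List.length_cons]; omega
  · have h1 := pvFlood_snd_length_le pvIsC (-4) (rest.drop (pvForCount pvIsC rest 3))
    have h2 := List.length_drop (l := rest) (i := pvForCount pvIsC rest 3)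
    simp only [List.length_cons]; omega
  · simp

def BaseScore_py (seq : String) : List Int := pvLoopA seq.toList

-- ===== PORT B =====
-- cls: 0 = 'G', 1 = 'C', 2 = 'other'
def pvCls (c : Char) : Nat :=
  if c == 'G' || c == 'g' then 0 else if c == 'C' || c == 'c' then 1 else 2

def pvRunScore (k : Nat) (L : Nat) : Int :=
  if k = 0 then min (L : Int) 4 else if k = 1 then -(min (L : Int) 4) else 0

def pvLoopB : List Char → List Int
  | [] => []
  | c :: rest =>
    let k := pvCls c
    let L := (rest.takeWhile (fun d => pvCls d == k)).length + 1
    List.replicate L (pvRunScore k L) ++ pvLoopB (rest.dropWhile (fun d => pvCls d == k))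
termination_by cs => cs.length
decreasing_by
  have := List.length_dropWhile_le (fun d => pvCls d == pvCls c) rest
  simp only [List.length_cons]; omega

def BaseScore_py_alt (seq : String) : List Int := pvLoopB seq.toList

-- ===== PRECONDITION & SPEC =====
def Spec_BaseScore_py (seq : String) (out : List Int) : Prop := out = BaseScore_py_alt seq
instance (seq : String) (out : List Int) : Decidable (Spec_BaseScore_py seq out) := by unfold Spec_BaseScore_py; infer_instance

-- ===== CLAIM (what is proved, stated in full; the proofs are below) =====
def Claim_equal_BaseScore_py : Prop := ∀ (seq : String), Dom_BaseScore_py seq → Spec_BaseScore_py seq (BaseScore_py seq)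

-- ===== LEMMAS AND PROOFS =====

theorem pvForCount_eq (p : Char → Bool) : ∀ (cs : List Char) (n : Nat),
    pvForCount p cs n = min n (cs.takeWhile p).length := by
  intro cs
  induction cs with
  | nil => intro n; cases n <;> simp [pvForCount]
  | cons c rest ih =>
    intro n
    cases n with
    | zero => simp [pvForCount]
    | succ m =>
      simp only [pvForCount, List.takeWhile_cons]
      by_cases h : p c
      · simp only [h, if_pos, ih m, List.length_cons]
        omega
      · simp [h]

theorem pvFlood_eq (p : Char → Bool) (v : Int) :
    ∀ (xs d : List Char), (∀ x ∈ xs, p x = true) →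
    (∀ y, d.head? = some y → p y = false) →
    pvFlood p v (xs ++ d) = (List.replicate xs.length v, d) := by
  intro xs
  induction xs with
  | nil =>
    intro d _ hd
    cases d with
    | nil => simp [pvFlood]
    | cons y t =>
      have : p y = false := hd y rfl
      simp [pvFlood, this]
  | cons x xs ih =>
    intro d hxs hd
    have hx : p x = true := hxs x (by simp)
    simp only [List.cons_append, pvFlood, hx, if_pos]
    rw [ih d (fun z hz => hxs z (by simp [hz])) hd]
    simp [List.replicate_succ]

theorem head?_dropWhile_false (p : Char → Bool) (l : List Char) :
    ∀ y, (l.dropWhile p).head? = some y → p y = false := by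
  induction l with
  | nil => simp
  | cons c rest ih =>
    intro y hy
    by_cases h : p c
    · exact ih y (by simpa [List.dropWhile_cons, h] using hy)
    · have hpc : p c = false := by simpa using h
      rw [List.dropWhile_cons_of_neg (by simp [hpc])] at hy
      simp only [List.head?_cons, Option.some.injEq] at hy
      cases hy
      exact hpc

theorem pvClsG_fun : (fun d => pvCls d == 0) = pvIsG := by
  funext x
  simp only [pvCls, pvIsG]
  by_cases h1 : (x == 'G' || x == 'g') = true
  · simp [h1]
  · by_cases h2 : (x == 'C' || x == 'c') = true <;> simp [h1, h2]

theorem pvClsC_fun : (fun d => pvCls d == 1) = pvIsC := by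
  funext x
  simp only [pvCls, pvIsC]
  by_cases h1 : (x == 'G' || x == 'g') = true
  · have hg : pvIsC x = false := by
      simp only [pvIsC]
      rcases Bool.or_eq_true_iff.mp h1 with h | h <;>
        simp_all [beq_iff_eq]
    simp only [pvIsC] at hg
    simp [h1, hg]
  · by_cases h2 : (x == 'C' || x == 'c') = true <;> simp [h1, h2]

theorem replicate_G (m : Nat) :
    List.replicate (min 3 m + 1) (((min 3 m : Nat) : Int) + 1) ++ List.replicate (m - min 3 m) 4
      = List.replicate (m + 1) (min ((m : Int) + 1) 4) := by
  by_cases h : m ≤ 3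
  · have h1 : min 3 m = m := by omega
    have h2 : min ((m : Int) + 1) 4 = (m : Int) + 1 := by omega
    rw [h1, h2]
    simp
  · have h1 : min 3 m = 3 := by omega
    have h2 : min ((m : Int) + 1) 4 = 4 := by omega
    have h3 : ((3 : Nat) : Int) + 1 = 4 := by norm_num
    rw [h1, h2, h3, ← List.replicate_add]
    congr 1
    omega

theorem replicate_C (m : Nat) :
    List.replicate (min 3 m + 1) (-(((min 3 m : Nat) : Int) + 1)) ++ List.replicate (m - min 3 m) (-4)
      = List.replicate (m + 1) (-(min ((m : Int) + 1) 4)) := by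
  by_cases h : m ≤ 3
  · have h1 : min 3 m = m := by omega
    have h2 : min ((m : Int) + 1) 4 = (m : Int) + 1 := by omega
    rw [h1, h2]
    simp
  · have h1 : min 3 m = 3 := by omega
    have h2 : min ((m : Int) + 1) 4 = 4 := by omega
    have h3 : -(((3 : Nat) : Int) + 1) = -4 := by norm_num
    rw [h1, h2, h3, ← List.replicate_add]
    congr 1
    omega

theorem drop_split (t d l : List Char) (k : Nat) (hl : t ++ d = l) (hk : k ≤ t.length) :
    l.drop k = t.drop k ++ d := by
  subst hl
  exact List.drop_append_of_le_length hk

theorem pvLoopB_other (rest : List Char) :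
    List.replicate (rest.takeWhile (fun d => pvCls d == 2)).length (0 : Int)
      ++ pvLoopB (rest.dropWhile (fun d => pvCls d == 2)) = pvLoopB rest := by
  cases rest with
  | nil => simp
  | cons x r =>
    by_cases hx : (pvCls x == 2) = true
    · have hx2 : pvCls x = 2 := by simpa using hx
      rw [List.takeWhile_cons_of_pos (p := fun d => pvCls d == 2) (l := r) hx,
          List.dropWhile_cons_of_pos (p := fun d => pvCls d == 2) (l := r) hx]
      conv_rhs => rw [pvLoopB]
      simp only [hx2, pvRunScore, List.length_cons]
      norm_num
    · rw [List.takeWhile_cons_of_neg (p := fun d => pvCls d == 2) (by simpa using hx),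
          List.dropWhile_cons_of_neg (p := fun d => pvCls d == 2) (by simpa using hx)]
      simp

theorem pvLoopA_eq_pvLoopB_aux : ∀ (n : Nat) (cs : List Char), cs.length ≤ n →
    pvLoopA cs = pvLoopB cs := by
  intro n
  induction n with
  | zero =>
    intro cs h
    have : cs = [] := by cases cs <;> simp_all
    subst this
    simp [pvLoopA, pvLoopB]
  | succ n ih =>
    intro cs h
    cases cs with
    | nil => simp [pvLoopA, pvLoopB]
    | cons c rest =>
      simp only [List.length_cons, Nat.add_le_add_iff_right] at h
      by_cases hG : pvIsG c = true
      · -- G run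
        have hdrop : rest.drop (min 3 (rest.takeWhile pvIsG).length)
            = (rest.takeWhile pvIsG).drop (min 3 (rest.takeWhile pvIsG).length)
              ++ rest.dropWhile pvIsG := by
          exact drop_split _ _ _ _ (List.takeWhile_append_dropWhile) (Nat.min_le_right 3 _)
        have hflood : pvFlood pvIsG 4 (rest.drop (min 3 (rest.takeWhile pvIsG).length))
            = (List.replicate ((rest.takeWhile pvIsG).length - min 3 (rest.takeWhile pvIsG).length) 4,
               rest.dropWhile pvIsG) := by
          rw [hdrop,
              pvFlood_eq pvIsG 4 _ _
                (fun x hx => List.mem_takeWhile_imp (List.mem_of_mem_drop hx))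
                (head?_dropWhile_false pvIsG rest),
              List.length_drop]
        have hA : pvLoopA (c :: rest)
            = List.replicate (min 3 (rest.takeWhile pvIsG).length + 1)
                (((min 3 (rest.takeWhile pvIsG).length : Nat) : Int) + 1)
              ++ List.replicate ((rest.takeWhile pvIsG).length - min 3 (rest.takeWhile pvIsG).length) 4
              ++ pvLoopA (rest.dropWhile pvIsG) := by
          rw [pvLoopA]
          simp only [hG, if_pos, pvForCount_eq, hflood]
        have hc0 : pvCls c = 0 := by
          simp only [pvIsG] at hG
          simp [pvCls, hG]
        have hB : pvLoopB (c :: rest)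
            = List.replicate ((rest.takeWhile pvIsG).length + 1)
                (min (((rest.takeWhile pvIsG).length : Int) + 1) 4)
              ++ pvLoopB (rest.dropWhile pvIsG) := by
          rw [pvLoopB]
          simp only [hc0, pvClsG_fun, pvRunScore, if_pos]
          norm_num
        rw [hA, hB, replicate_G,
            ih (rest.dropWhile pvIsG) (le_trans (List.length_dropWhile_le _ _) h)]
      · by_cases hC : pvIsC c = true
        · -- C run
          have hdrop : rest.drop (min 3 (rest.takeWhile pvIsC).length)
              = (rest.takeWhile pvIsC).drop (min 3 (rest.takeWhile pvIsC).length)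
                ++ rest.dropWhile pvIsC := by
            exact drop_split _ _ _ _ (List.takeWhile_append_dropWhile) (Nat.min_le_right 3 _)
          have hflood : pvFlood pvIsC (-4) (rest.drop (min 3 (rest.takeWhile pvIsC).length))
              = (List.replicate ((rest.takeWhile pvIsC).length - min 3 (rest.takeWhile pvIsC).length) (-4),
                 rest.dropWhile pvIsC) := by
            rw [hdrop,
                pvFlood_eq pvIsC (-4) _ _
                  (fun x hx => List.mem_takeWhile_imp (List.mem_of_mem_drop hx))
                  (head?_dropWhile_false pvIsC rest),
                List.length_drop]
          have hA : pvLoopA (c :: rest)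
              = List.replicate (min 3 (rest.takeWhile pvIsC).length + 1)
                  (-(((min 3 (rest.takeWhile pvIsC).length : Nat) : Int) + 1))
                ++ List.replicate ((rest.takeWhile pvIsC).length - min 3 (rest.takeWhile pvIsC).length) (-4)
                ++ pvLoopA (rest.dropWhile pvIsC) := by
            rw [pvLoopA]
            simp only [hG, hC, if_pos, Bool.false_eq_true, pvForCount_eq, hflood]
            norm_num
          have hc1 : pvCls c = 1 := by
            simp only [pvIsG] at hG
            simp only [pvIsC] at hC
            simp [pvCls, hG, hC]
          have hB : pvLoopB (c :: rest)
              = List.replicate ((rest.takeWhile pvIsC).length + 1)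
                  (-(min (((rest.takeWhile pvIsC).length : Int) + 1) 4))
                ++ pvLoopB (rest.dropWhile pvIsC) := by
            rw [pvLoopB]
            simp only [hc1, pvClsC_fun, pvRunScore]
            norm_num
          rw [hA, hB, replicate_C,
              ih (rest.dropWhile pvIsC) (le_trans (List.length_dropWhile_le _ _) h)]
        · -- other
          have hc2 : pvCls c = 2 := by
            simp only [pvIsG] at hG
            simp only [pvIsC] at hC
            simp [pvCls, hG, hC]
          have hA : pvLoopA (c :: rest) = 0 :: pvLoopA rest := by
            rw [pvLoopA]
            simp [hG, hC]
          have hB : pvLoopB (c :: rest)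
              = List.replicate ((rest.takeWhile (fun d => pvCls d == 2)).length + 1) (0 : Int)
                ++ pvLoopB (rest.dropWhile (fun d => pvCls d == 2)) := by
            rw [pvLoopB]
            simp only [hc2, pvRunScore]
            norm_num
          rw [hA, hB, ih rest h, ← pvLoopB_other rest]
          simp [List.replicate_succ]

-- ===== VERDICT (by name: the statement is the Claim_ definition above) =====
theorem BaseScore_py_spec : Claim_equal_BaseScore_py := by
  intro seq _
  unfold Spec_BaseScore_py BaseScore_py BaseScore_py_alt
  exact pvLoopA_eq_pvLoopB_aux seq.toList.length seq.toList le_rfl
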